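-- pv_equiv track=rewrite | github.com/MiguelR90/katas | leetcode/medium-2661-first-completely-painted-row-or-col.py | check
-- ===== SOURCE A (Python) =====
-- def check(mat: list[list[int]]) -> bool:
--     m: int = len(mat)
--     n: int = len(mat[0])
--
--     # row-wise
--     for i in range(m):
--         if all(mat[i][j] == -1 for j in range(n)):
--             return True
--
--     # col-wise
--     for j in range(n):
--         if all(mat[i][j] == -1 for i in range(m)):
--             return True
--
--     return False
-- ===== SOURCE B (Python) =====
-- def check(mat: list[list[int]]) -> bool:
--     m: int = len(mat)
--     n: int = len(mat[0])
--     row_count = [0] * m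
--     col_count = [0] * n
--     for i, row in enumerate(mat):
--         for j, v in enumerate(row[:n]):
--             if v == -1:
--                 row_count[i] += 1
--                 col_count[j] += 1
--     return any(c == n for c in row_count) or any(c == m for c in col_count)
-- ===== Notes on version B (the rewrite author's own statement) =====
-- stated objective: alternative
-- what changed: Instead of scanning each row with all() and then each column with all() (early exits, column-major re-reads), B makes one pass over the cells of the m-by-n grid tabulating per-row and per-column counts of -1 and then compares the counts to the dimensions.
import Mathlib
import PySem

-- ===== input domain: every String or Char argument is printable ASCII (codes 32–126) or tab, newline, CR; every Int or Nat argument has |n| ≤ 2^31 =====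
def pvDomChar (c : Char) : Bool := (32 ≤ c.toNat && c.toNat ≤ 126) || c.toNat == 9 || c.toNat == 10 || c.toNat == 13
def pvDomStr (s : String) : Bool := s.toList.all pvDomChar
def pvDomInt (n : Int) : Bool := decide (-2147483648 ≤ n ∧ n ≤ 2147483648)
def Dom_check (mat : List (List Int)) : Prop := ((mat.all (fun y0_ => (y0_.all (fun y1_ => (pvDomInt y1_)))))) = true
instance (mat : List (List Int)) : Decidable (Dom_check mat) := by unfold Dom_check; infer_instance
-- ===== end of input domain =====

-- B replaces A's row-scan-then-column-scan with all()/early exits by a single pass over the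
-- cells that tabulates per-row and per-column counts of -1, then compares counts to the
-- dimensions (objective: alternative decomposition, same asymptotic cost).

-- ===== PORT A =====
-- mat[i][j] (indices produced by range, hence in range under Pre_; pyGetD is exact there)
def cellA (mat : List (List Int)) (i j : Int) : Int :=
  PySem.List.pyGetD (PySem.List.pyGetD mat i ([] : List Int)) j 0

def check (mat : List (List Int)) : Bool :=
  let m : Int := mat.length
  let n : Int := (PySem.List.pyGetD mat 0 ([] : List Int)).length
  if (PySem.List.pyRange 0 m 1).any (fun i =>
        (PySem.List.pyRange 0 n 1).all (fun j => cellA mat i j == -1)) then true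
  else if (PySem.List.pyRange 0 n 1).any (fun j =>
        (PySem.List.pyRange 0 m 1).all (fun i => cellA mat i j == -1)) then true
  else false

-- ===== PORT B =====
-- counts[k] += 1  (k in range under Pre_, where it is exact)
def incAt (l : List Int) (k : Nat) : List Int := l.set k (l.getD k 0 + 1)

-- 'for j, v in enumerate(row)' body of Source B
def colLoop (i : Nat) (j : Nat) (row : List Int) (st : List Int × List Int) :
    List Int × List Int :=
  match row with
  | [] => st
  | v :: rest =>
      colLoop i (j + 1) rest (if v == -1 then (incAt st.1 i, incAt st.2 j) else st)

-- 'for i, row in enumerate(mat)' of Source B; row[:n] is List.take n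
def rowLoop (n : Nat) (i : Nat) (rows : List (List Int)) (st : List Int × List Int) :
    List Int × List Int :=
  match rows with
  | [] => st
  | r :: rest => rowLoop n (i + 1) rest (colLoop i 0 (r.take n) st)

def check_alt (mat : List (List Int)) : Bool :=
  let m := mat.length
  let n := (PySem.List.pyGetD mat 0 ([] : List Int)).length
  let st := rowLoop n 0 mat (List.replicate m 0, List.replicate n 0)
  st.1.any (fun c => c == (n : Int)) || st.2.any (fun c => c == (m : Int))

-- ===== PRECONDITION & SPEC =====
-- the scan of row i over columns j < n returns True without raising
def rowTrueP (mat : List (List Int)) (n i : Nat) : Prop :=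
  n ≤ (mat.getD i []).length ∧ ∀ j < n, (mat.getD i []).getD j 0 = -1
-- the scan of row i raises IndexError (all its entries are -1 but it is shorter than n)
def rowRaiseP (mat : List (List Int)) (n i : Nat) : Prop :=
  (mat.getD i []).length < n ∧ ∀ j < (mat.getD i []).length, (mat.getD i []).getD j 0 = -1
-- the scan of column j returns True without raising
def colTrueP (mat : List (List Int)) (j : Nat) : Prop :=
  ∀ i < mat.length, j < (mat.getD i []).length ∧ (mat.getD i []).getD j 0 = -1
-- the scan of column j raises IndexError (a row too short for j, all rows above it -1 at j)
def colRaiseP (mat : List (List Int)) (j : Nat) : Prop :=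
  ∃ i < mat.length, (mat.getD i []).length ≤ j ∧
    ∀ i' < i, j < (mat.getD i' []).length ∧ (mat.getD i' []).getD j 0 = -1
-- Pre_ excludes exactly the inputs on which A raises IndexError: the empty matrix (mat[0])
-- and the ragged matrices whose early-exiting row/column scans reach a too-short row.
def Pre_check (mat : List (List Int)) : Prop :=
  mat ≠ [] ∧
  (¬ ∃ i < mat.length, rowRaiseP mat (mat.headD []).length i ∧
      ∀ i' < i, ¬ rowTrueP mat (mat.headD []).length i') ∧
  ((∃ i < mat.length, rowTrueP mat (mat.headD []).length i) ∨
    ¬ ∃ j < (mat.headD []).length, colRaiseP mat j ∧ ∀ j' < j, ¬ colTrueP mat j')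
instance (mat : List (List Int)) : Decidable (Pre_check mat) := by
  unfold Pre_check rowTrueP rowRaiseP colTrueP colRaiseP; infer_instance

def pvWitness_check : List (List Int) := [[-1, 0], [0, -1]]

def Spec_check (mat : List (List Int)) (out : Bool) : Prop := out = check_alt mat
instance (mat : List (List Int)) (out : Bool) : Decidable (Spec_check mat out) := by
  unfold Spec_check; infer_instance

-- ===== CLAIM (what is proved, stated in full; the proofs are below) =====
def Claim_equal_check : Prop :=
  ∀ (mat : List (List Int)), Dom_check mat → Pre_check mat → Spec_check mat (check mat)

-- ===== LEMMAS AND PROOFS =====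

-- mat[i][j] read with Nat indices and defaults (equal to the real cell in range)
def gcell (mat : List (List Int)) (i j : Nat) : Int := (mat.getD i []).getD j 0

-- l with l[k] increased by c (no-op out of range): closed form of iterated incAt
def addAt (l : List Int) (k : Nat) (c : Int) : List Int := l.set k (l.getD k 0 + c)

theorem incAt_eq_addAt (l : List Int) (k : Nat) : incAt l k = addAt l k 1 := rfl

theorem addAt_zero (l : List Int) (k : Nat) : addAt l k 0 = l := by
  by_cases h : k < l.length
  · rw [addAt, add_zero, List.getD_eq_getElem l 0 h]
    exact List.set_getElem_self h
  · rw [addAt]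
    exact List.set_eq_of_length_le (by omega)

theorem addAt_addAt (l : List Int) (k : Nat) (c d : Int) :
    addAt (addAt l k c) k d = addAt l k (c + d) := by
  by_cases h : k < l.length
  · have h' : k < (l.set k (l.getD k 0 + c)).length := by simpa using h
    rw [addAt, addAt, addAt, List.getD_eq_getElem _ 0 h', List.getElem_set_self h',
      List.set_set, List.getD_eq_getElem l 0 h, add_assoc]
  · have hle : l.length ≤ k := le_of_not_gt h
    rw [addAt, addAt, addAt, List.set_eq_of_length_le hle, List.set_eq_of_length_le hle,
      List.set_eq_of_length_le hle]

theorem getD_addAt (l : List Int) (k k' : Nat) (c : Int) :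
    (addAt l k c).getD k' 0 =
      if k' = k ∧ k < l.length then l.getD k 0 + c else l.getD k' 0 := by
  by_cases hk : k < l.length
  · by_cases he : k' = k
    · subst he
      have h' : k' < (l.set k' (l.getD k' 0 + c)).length := by simpa using hk
      rw [addAt, List.getD_eq_getElem _ 0 h', List.getElem_set_self h', if_pos ⟨rfl, hk⟩]
    · rw [addAt, if_neg (by tauto)]
      simp only [List.getD_eq_getElem?_getD]
      rw [List.getElem?_set_ne (by omega)]
  · rw [addAt, List.set_eq_of_length_le (le_of_not_gt hk), if_neg (by tauto)]

-- colLoop: first component gets row.count (-1) added at index i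
theorem colLoop_fst (i : Nat) (row : List Int) : ∀ (j : Nat) (st : List Int × List Int),
    (colLoop i j row st).1 = addAt st.1 i ((row.count (-1) : Nat) : Int) := by
  induction row with
  | nil => intro j st; simp [colLoop, addAt_zero]
  | cons v rest ih =>
      intro j st
      by_cases hv : v = -1
      · rw [colLoop, if_pos (by simp [hv])]
        rw [ih]
        show addAt (incAt st.1 i) i _ = _
        rw [incAt_eq_addAt, addAt_addAt]
        congr 1
        rw [List.count_cons, if_pos (by simp [hv])]
        push_cast; ring
      · rw [colLoop, if_neg (by simp [hv]), ih]
        simp [hv]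

theorem colLoop_fst_length (i : Nat) (row : List Int) : ∀ (j : Nat) (st : List Int × List Int),
    (colLoop i j row st).1.length = st.1.length := by
  induction row with
  | nil => intro j st; simp [colLoop]
  | cons v rest ih =>
      intro j st
      by_cases hv : v = -1
      · rw [colLoop, if_pos (by simp [hv]), ih]; simp [incAt]
      · rw [colLoop, if_neg (by simp [hv]), ih]

theorem colLoop_snd_length (i : Nat) (row : List Int) : ∀ (j : Nat) (st : List Int × List Int),
    (colLoop i j row st).2.length = st.2.length := by
  induction row with
  | nil => intro j st; simp [colLoop]
  | cons v rest ih =>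
      intro j st
      by_cases hv : v = -1
      · rw [colLoop, if_pos (by simp [hv]), ih]; simp [incAt]
      · rw [colLoop, if_neg (by simp [hv]), ih]

-- colLoop: pointwise effect on the column counters
theorem colLoop_snd_getD (i : Nat) (row : List Int) :
    ∀ (j : Nat) (st : List Int × List Int) (k : Nat), k < st.2.length →
    (colLoop i j row st).2.getD k 0 =
      st.2.getD k 0 +
        (if j ≤ k ∧ k - j < row.length ∧ row.getD (k - j) 0 = -1 then 1 else 0) := by
  induction row with
  | nil => intro j st k hk; simp [colLoop]
  | cons v rest ih =>
      intro j st k hk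
      rw [colLoop]
      set st' := if v == -1 then (incAt st.1 i, incAt st.2 j) else st with hst'
      have hlen : st'.2.length = st.2.length := by
        by_cases hv : v = -1 <;> simp [hst', hv, incAt]
      rw [ih (j + 1) st' k (by omega)]
      have h2 : st'.2.getD k 0 = st.2.getD k 0 + (if k = j ∧ v = -1 then 1 else 0) := by
        by_cases hv : v = -1
        · rw [hst', if_pos (by simp [hv])]
          show (incAt st.2 j).getD k 0 = _
          rw [incAt_eq_addAt, getD_addAt]
          by_cases hkj : k = j
          · subst hkj; rw [if_pos ⟨rfl, hk⟩, if_pos ⟨rfl, hv⟩]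
          · rw [if_neg (by tauto), if_neg (by tauto), add_zero]
        · rw [hst', if_neg (by simp [hv]), if_neg (by tauto), add_zero]
      rw [h2, add_assoc]
      congr 1
      by_cases hkj : k = j
      · subst hkj
        simp only [Nat.sub_self, List.getD_cons_zero, List.length_cons]
        by_cases hv : v = -1 <;> simp [hv]
      · rw [if_neg (by tauto), zero_add]
        by_cases hjk : j ≤ k
        · obtain ⟨t, ht⟩ : ∃ t, k - j = t + 1 := ⟨k - j - 1, by omega⟩
          have ht' : k - (j + 1) = t := by omega
          rw [ht, ht', List.getD_cons_succ, List.length_cons]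
          exact if_congr
            ⟨fun ⟨h1, h2, h3⟩ => ⟨by omega, by omega, h3⟩,
             fun ⟨h1, h2, h3⟩ => ⟨by omega, by omega, h3⟩⟩ rfl rfl
        · rw [if_neg (by omega), if_neg (by omega)]

-- rowLoop length preservation
theorem rowLoop_fst_length (n : Nat) (rows : List (List Int)) :
    ∀ (i : Nat) (st : List Int × List Int), (rowLoop n i rows st).1.length = st.1.length := by
  induction rows with
  | nil => intro i st; simp [rowLoop]
  | cons r rest ih => intro i st; rw [rowLoop, ih, colLoop_fst_length]

theorem rowLoop_snd_length (n : Nat) (rows : List (List Int)) :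
    ∀ (i : Nat) (st : List Int × List Int), (rowLoop n i rows st).2.length = st.2.length := by
  induction rows with
  | nil => intro i st; simp [rowLoop]
  | cons r rest ih => intro i st; rw [rowLoop, ih, colLoop_snd_length]

-- rowLoop: pointwise row counters
theorem rowLoop_fst_getD (n : Nat) (rows : List (List Int)) :
    ∀ (i : Nat) (st : List Int × List Int) (k : Nat), k < st.1.length →
    (rowLoop n i rows st).1.getD k 0 =
      st.1.getD k 0 +
        (if i ≤ k ∧ k - i < rows.length
         then ((((rows.getD (k - i) []).take n).count (-1) : Nat) : Int) else 0) := by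
  induction rows with
  | nil => intro i st k hk; simp [rowLoop]
  | cons r rest ih =>
      intro i st k hk
      rw [rowLoop, ih (i + 1) _ k (by rw [colLoop_fst_length]; omega), colLoop_fst,
        getD_addAt]
      by_cases hki : k = i
      · subst hki
        rw [if_pos ⟨rfl, hk⟩, if_neg (by omega), add_zero,
          if_pos ⟨le_refl k, by simp⟩]
        simp
      · rw [if_neg (by tauto)]
        congr 1
        by_cases hik : i ≤ k
        · have h1 : i + 1 ≤ k := by omega
          obtain ⟨t, ht⟩ : ∃ t, k - i = t + 1 := ⟨k - i - 1, by omega⟩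
          have ht' : k - (i + 1) = t := by omega
          rw [ht, ht', List.getD_cons_succ]
          by_cases hlt : t < rest.length
          · rw [if_pos ⟨h1, by omega⟩, if_pos ⟨hik, by simp; omega⟩]
          · rw [if_neg (by omega), if_neg (by simp; omega)]
        · rw [if_neg (by omega), if_neg (by omega)]

-- rowLoop: pointwise column counters
theorem rowLoop_snd_getD (n : Nat) (rows : List (List Int)) :
    ∀ (i : Nat) (st : List Int × List Int) (k : Nat), k < st.2.length →
    (rowLoop n i rows st).2.getD k 0 =
      st.2.getD k 0 +
        ((rows.countP (fun row =>
            decide (k < (row.take n).length ∧ (row.take n).getD k 0 = -1)) : Nat) : Int) := by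
  induction rows with
  | nil => intro i st k hk; simp [rowLoop]
  | cons r rest ih =>
      intro i st k hk
      rw [rowLoop, ih (i + 1) _ k (by rw [colLoop_snd_length]; omega),
        colLoop_snd_getD i (r.take n) 0 st k hk, List.countP_cons]
      simp only [Nat.sub_zero, Nat.zero_le, true_and]
      by_cases hc : k < (r.take n).length ∧ (r.take n).getD k 0 = -1
      · rw [if_pos hc, if_pos (by simpa using hc)]
        push_cast; ring
      · rw [if_neg hc, if_neg (by simpa using hc)]
        push_cast; ring

-- the row counter equals n exactly when the first n cells of the row are all -1
theorem take_count_iff (row : List Int) (N : Nat) :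
    (row.take N).count (-1) = N ↔ ∀ j < N, row.getD j 0 = -1 := by
  constructor
  · intro h j hj
    have h1 : (row.take N).count (-1) ≤ (row.take N).length := List.count_le_length
    have h2 : (row.take N).length = min N row.length := List.length_take
    have hlen : (row.take N).length = N := by omega
    have hjt : j < (row.take N).length := by omega
    have hjr : j < row.length := by omega
    have hall := List.count_eq_length.mp (by rw [h, hlen])
    have hv := hall _ (List.getElem_mem hjt)
    rw [List.getElem_take] at hv
    rw [List.getD_eq_getElem row 0 hjr]
    omega
  · intro h
    have hlen : N ≤ row.length := by
      by_contra hc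
      have h0 := h row.length (by omega)
      rw [List.getD_eq_getElem?_getD, List.getElem?_eq_none (le_refl _)] at h0
      norm_num at h0
    have hlt : (row.take N).length = N := by
      have := List.length_take (i := N) (l := row); omega
    have hcl : List.count (-1) (row.take N) = (row.take N).length := by
      apply List.count_eq_length.mpr
      intro b hb
      obtain ⟨j, hj, hv⟩ := List.mem_iff_getElem.mp hb
      rw [List.getElem_take] at hv
      have hg := h j (by omega)
      rw [List.getD_eq_getElem row 0 (by omega)] at hg
      omega
    omega

-- the column counter equals m exactly when column k is all -1 (and everywhere defined)
theorem take_col_iff (mat : List (List Int)) (N k : Nat) (hk : k < N) :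
    (mat.countP (fun row =>
        decide (k < (row.take N).length ∧ (row.take N).getD k 0 = -1)) = mat.length)
      ↔ ∀ i < mat.length, gcell mat i k = -1 := by
  rw [List.countP_eq_length]
  constructor
  · intro h i hi
    have hmem : mat.getD i [] ∈ mat := by
      rw [List.getD_eq_getElem mat [] hi]; exact List.getElem_mem hi
    have hc := h _ hmem
    simp only [decide_eq_true_eq] at hc
    obtain ⟨h1, h2⟩ := hc
    have h2' : ((mat.getD i []).take N).length = min N (mat.getD i []).length :=
      List.length_take
    have hkr : k < (mat.getD i []).length := by omega
    rw [gcell, ← h2, List.getD_eq_getElem _ 0 h1, List.getD_eq_getElem _ 0 hkr,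
      List.getElem_take]
  · intro h row hrow
    obtain ⟨i, hi, hv⟩ := List.mem_iff_getElem.mp hrow
    have hg := h i hi
    rw [gcell, List.getD_eq_getElem mat [] hi, hv] at hg
    have hkr : k < row.length := by
      by_contra hc
      rw [List.getD_eq_getElem?_getD, List.getElem?_eq_none (by omega)] at hg
      norm_num at hg
    rw [List.getD_eq_getElem row 0 hkr] at hg
    have h1 : k < (row.take N).length := by
      have := List.length_take (i := N) (l := row)
      omega
    simp only [decide_eq_true_eq]
    refine ⟨h1, ?_⟩
    rw [List.getD_eq_getElem _ 0 h1, List.getElem_take]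
    exact hg

-- any (· == x) over getD
theorem any_beq_iff (l : List Int) (x : Int) :
    l.any (fun c => c == x) = true ↔ ∃ k < l.length, l.getD k 0 = x := by
  rw [List.any_eq_true]
  constructor
  · rintro ⟨c, hc, hb⟩
    obtain ⟨k, hk, hv⟩ := List.mem_iff_getElem.mp hc
    exact ⟨k, hk, by rw [List.getD_eq_getElem l 0 hk, hv]; exact beq_iff_eq.mp hb⟩
  · rintro ⟨k, hk, he⟩
    refine ⟨l.getD k 0, ?_, by simpa using he⟩
    rw [List.getD_eq_getElem l 0 hk]
    exact List.getElem_mem hk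

theorem any_pyRange_natCast (M : Nat) (g : Int → Bool) :
    (PySem.List.pyRange 0 (M : Int) 1).any g = true ↔ ∃ i < M, g (i : Int) = true := by
  rw [List.any_eq_true]
  constructor
  · rintro ⟨x, hx, hg⟩
    rw [PySem.List.mem_pyRange_one] at hx
    exact ⟨x.toNat, by omega, by rwa [Int.toNat_of_nonneg hx.1]⟩
  · rintro ⟨i, hi, hg⟩
    exact ⟨i, PySem.List.mem_pyRange_one.mpr ⟨by positivity, by exact_mod_cast hi⟩, hg⟩

theorem all_pyRange_natCast (M : Nat) (g : Int → Bool) :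
    (PySem.List.pyRange 0 (M : Int) 1).all g = true ↔ ∀ i < M, g (i : Int) = true := by
  rw [List.all_eq_true]
  constructor
  · intro h i hi
    exact h _ (PySem.List.mem_pyRange_one.mpr ⟨by positivity, by exact_mod_cast hi⟩)
  · intro h x hx
    rw [PySem.List.mem_pyRange_one] at hx
    have := h x.toNat (by omega)
    rwa [Int.toNat_of_nonneg hx.1] at this
theorem cellA_natCast (mat : List (List Int)) (i j : Nat) :
    cellA mat (i : Int) (j : Int) = gcell mat i j := by
  simp [cellA, gcell, PySem.List.pyGetD_natCast]

-- A's value characterised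
theorem checkA_iff (mat : List (List Int)) :
    check mat = true ↔
      ((∃ i < mat.length, ∀ j < (PySem.List.pyGetD mat 0 ([] : List Int)).length,
          gcell mat i j = -1) ∨
       (∃ j < (PySem.List.pyGetD mat 0 ([] : List Int)).length, ∀ i < mat.length,
          gcell mat i j = -1)) := by
  have hor : check mat =
      ((PySem.List.pyRange 0 (mat.length : Int) 1).any (fun i =>
        (PySem.List.pyRange 0 ((PySem.List.pyGetD mat 0 ([] : List Int)).length : Int) 1).all
          (fun j => cellA mat i j == -1)) ||
       (PySem.List.pyRange 0 ((PySem.List.pyGetD mat 0 ([] : List Int)).length : Int) 1).any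
         (fun j => (PySem.List.pyRange 0 (mat.length : Int) 1).all
           (fun i => cellA mat i j == -1))) := by
    show (if ((PySem.List.pyRange 0 (mat.length : Int) 1).any (fun i =>
        (PySem.List.pyRange 0 ((PySem.List.pyGetD mat 0 ([] : List Int)).length : Int) 1).all
          (fun j => cellA mat i j == -1))) then true
      else if ((PySem.List.pyRange 0 ((PySem.List.pyGetD mat 0 ([] : List Int)).length : Int) 1).any
         (fun j => (PySem.List.pyRange 0 (mat.length : Int) 1).all
           (fun i => cellA mat i j == -1))) then true else false) = _
    split_ifs with h1 h2 <;> simp [*]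
  rw [hor, Bool.or_eq_true, any_pyRange_natCast, any_pyRange_natCast]
  constructor
  · rintro (⟨i, hi, hall⟩ | ⟨j, hj, hall⟩)
    · refine Or.inl ⟨i, hi, fun j hj => ?_⟩
      have := (all_pyRange_natCast _ _).mp hall j hj
      rwa [cellA_natCast, beq_iff_eq] at this
    · refine Or.inr ⟨j, hj, fun i hi => ?_⟩
      have := (all_pyRange_natCast _ _).mp hall i hi
      rwa [cellA_natCast, beq_iff_eq] at this
  · rintro (⟨i, hi, hall⟩ | ⟨j, hj, hall⟩)
    · exact Or.inl ⟨i, hi, (all_pyRange_natCast _ _).mpr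
        (fun j hj => by rw [cellA_natCast, beq_iff_eq]; exact hall j hj)⟩
    · exact Or.inr ⟨j, hj, (all_pyRange_natCast _ _).mpr
        (fun i hi => by rw [cellA_natCast, beq_iff_eq]; exact hall i hi)⟩

-- B's value characterised
theorem checkB_iff (mat : List (List Int)) :
    check_alt mat = true ↔
      ((∃ i < mat.length, ∀ j < (PySem.List.pyGetD mat 0 ([] : List Int)).length,
          gcell mat i j = -1) ∨
       (∃ j < (PySem.List.pyGetD mat 0 ([] : List Int)).length, ∀ i < mat.length,
          gcell mat i j = -1)) := by
  set N := (PySem.List.pyGetD mat 0 ([] : List Int)).length with hN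
  set M := mat.length with hM
  set st := rowLoop N 0 mat (List.replicate M 0, List.replicate N 0) with hst
  have h1len : st.1.length = M := by rw [hst, rowLoop_fst_length]; simp
  have h2len : st.2.length = N := by rw [hst, rowLoop_snd_length]; simp
  have hrc : ∀ k, k < M →
      st.1.getD k 0 = ((((mat.getD k []).take N).count (-1) : Nat) : Int) := by
    intro k hk
    rw [hst, rowLoop_fst_getD N mat 0 _ k (by simpa using hk),
      if_pos ⟨Nat.zero_le k, by simpa using hk⟩]
    simp
  have hcc : ∀ k, k < N → st.2.getD k 0 =
      ((mat.countP (fun row =>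
          decide (k < (row.take N).length ∧ (row.take N).getD k 0 = -1)) : Nat) : Int) := by
    intro k hk
    rw [hst, rowLoop_snd_getD N mat 0 _ k (by simpa using hk)]
    simp
  show (st.1.any (fun c => c == (N : Int)) || st.2.any (fun c => c == (M : Int))) = true ↔ _
  rw [Bool.or_eq_true, any_beq_iff, any_beq_iff, h1len, h2len]
  constructor
  · rintro (⟨k, hk, he⟩ | ⟨k, hk, he⟩)
    · rw [hrc k hk] at he
      exact Or.inl ⟨k, hk, (take_count_iff _ N).mp (by exact_mod_cast he)⟩
    · rw [hcc k hk, hM] at he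
      exact Or.inr ⟨k, hk, (take_col_iff mat N k hk).mp (by exact_mod_cast he)⟩
  · rintro (⟨k, hk, hall⟩ | ⟨k, hk, hall⟩)
    · refine Or.inl ⟨k, hk, ?_⟩
      rw [hrc k hk]
      exact_mod_cast (take_count_iff _ N).mpr hall
    · refine Or.inr ⟨k, hk, ?_⟩
      rw [hcc k hk, hM]
      exact_mod_cast (take_col_iff mat N k hk).mpr hall

-- ===== VERDICT (by name: the statement is the Claim_ definition above) =====
theorem check_spec : Claim_equal_check := by
  intro mat _ _
  unfold Spec_check
  rw [Bool.eq_iff_iff, checkA_iff, checkB_iff]
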